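-- pv_equiv track=rewrite | github.com/DDMAL/4-Voice-Project | transformations.py | count_transform
-- ===== SOURCE A (Python) =====
-- def count_transform(trans_dict):
--
--     keys = trans_dict.keys()
--
--     all_nums = []
--
--     for key in keys:
--         all_nums.append(trans_dict[key])
--
--     each_trans = zip(*all_nums)
--
--     list_sums = []
--
--     for key in each_trans:
--         list_sums.append(sum(key))
--
--     return list_sums
-- ===== SOURCE B (Python) =====
-- def count_transform(trans_dict):
--     it = iter(trans_dict.values())
--     try:
--         acc = list(next(it))
--     except StopIteration:
--         return []
--     for row in it:
--         acc = [a + b for a, b in zip(acc, row)]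
--     return acc
-- ===== Notes on version B (the rewrite author's own statement) =====
-- stated objective: simpler
-- what changed: B folds over the dict's value rows keeping a running column-sum accumulator (zip truncating progressively), instead of materialising the key list, re-looking up every value, transposing with zip(*rows) and summing each column.
import Mathlib
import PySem

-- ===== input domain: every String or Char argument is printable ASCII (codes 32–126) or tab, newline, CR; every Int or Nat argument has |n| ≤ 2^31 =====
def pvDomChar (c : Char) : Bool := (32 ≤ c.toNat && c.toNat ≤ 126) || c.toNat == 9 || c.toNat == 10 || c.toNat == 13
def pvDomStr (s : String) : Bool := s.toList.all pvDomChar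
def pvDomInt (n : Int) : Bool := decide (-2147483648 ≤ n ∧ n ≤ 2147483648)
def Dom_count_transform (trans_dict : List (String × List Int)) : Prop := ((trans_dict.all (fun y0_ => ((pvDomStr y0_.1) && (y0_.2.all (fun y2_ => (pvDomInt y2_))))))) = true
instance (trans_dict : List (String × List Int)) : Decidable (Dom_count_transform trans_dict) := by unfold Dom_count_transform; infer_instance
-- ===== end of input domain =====

-- B replaces A's key-list materialisation + zip(*rows) transpose + per-column sums
-- by a single fold over the value rows with a running column-sum accumulator.

-- ===== PORT A =====
-- Hand port of variadic zip(*rows) (no PySem primitive for variadic zip): exact —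
-- pops the head of every row, stops as soon as any row is exhausted (shortest-input rule).
def pvHeads : List (List Int) → Option (List Int × List (List Int))
  | [] => some ([], [])
  | [] :: _ => none
  | (y :: ys) :: rs =>
      match pvHeads rs with
      | none => none
      | some (hs, ts) => some (y :: hs, ys :: ts)

def pvZipAux : List Int → List (List Int) → List (List Int)
  | [], _ => []
  | x :: xs, rows =>
      match pvHeads rows with
      | none => []
      | some (hs, ts) => (x :: hs) :: pvZipAux xs ts

def pvZip : List (List Int) → List (List Int)
  | [] => []
  | r :: rest => pvZipAux r rest

def count_transform (trans_dict : List (String × List Int)) : List Int :=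
  let d := PySem.Dict.ofList trans_dict
  let keys := PySem.Dict.keys d
  -- trans_dict[key]: key always comes from d.keys, so get? is some; getD [] is exact here
  let all_nums := keys.foldl (fun acc k => acc ++ [PySem.Dict.getD d k []]) []
  let each_trans := pvZip all_nums
  let list_sums := each_trans.foldl (fun acc row => acc ++ [row.sum]) []
  list_sums

-- ===== PORT B =====
def count_transform_alt (trans_dict : List (String × List Int)) : List Int :=
  match PySem.Dict.values (PySem.Dict.ofList trans_dict) with
  | [] => []
  | r :: rest => rest.foldl (fun acc row => List.zipWith (· + ·) acc row) r

-- ===== PRECONDITION & SPEC =====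
def Spec_count_transform (trans_dict : List (String × List Int)) (out : List Int) : Prop := out = count_transform_alt trans_dict
instance (trans_dict : List (String × List Int)) (out : List Int) : Decidable (Spec_count_transform trans_dict out) := by unfold Spec_count_transform; infer_instance

-- ===== CLAIM (what is proved, stated in full; the proofs are below) =====
def Claim_equal_count_transform : Prop := ∀ (trans_dict : List (String × List Int)), Dom_count_transform trans_dict → Spec_count_transform trans_dict (count_transform trans_dict)

-- ===== LEMMAS AND PROOFS =====

theorem foldl_append_singleton_eq_map {α β : Type} (f : α → β) (l : List α) (acc : List β) :
    l.foldl (fun acc k => acc ++ [f k]) acc = acc ++ l.map f := by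
  induction l generalizing acc with
  | nil => simp
  | cons x xs ih => simp [List.foldl, ih]

theorem map_sum_pvZipAux_nil (r : List Int) :
    (pvZipAux r []).map List.sum = r := by
  induction r with
  | nil => simp [pvZipAux]
  | cons x xs ih => simp [pvZipAux, pvHeads, ih]

theorem map_sum_pvZipAux_cons (r s : List Int) (rows : List (List Int)) :
    (pvZipAux r (s :: rows)).map List.sum
      = (pvZipAux (List.zipWith (· + ·) r s) rows).map List.sum := by
  induction r generalizing s rows with
  | nil => simp [pvZipAux]
  | cons x xs ih =>
    cases s with
    | nil => simp [pvZipAux, pvHeads]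
    | cons y ys =>
      simp only [pvZipAux, pvHeads, List.zipWith]
      cases h : pvHeads rows with
      | none => simp
      | some p =>
        obtain ⟨hs, ts⟩ := p
        simp only [List.map_cons, List.sum_cons, ih ys ts]
        ring_nf

theorem map_sum_pvZipAux_eq_foldl (rest : List (List Int)) (r : List Int) :
    (pvZipAux r rest).map List.sum
      = rest.foldl (fun acc row => List.zipWith (· + ·) acc row) r := by
  induction rest generalizing r with
  | nil => simp [map_sum_pvZipAux_nil]
  | cons s rows ih =>
    simp only [List.foldl]
    rw [map_sum_pvZipAux_cons, ih]

theorem count_transform_eq (trans_dict : List (String × List Int)) :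
    count_transform trans_dict = count_transform_alt trans_dict := by
  unfold count_transform count_transform_alt
  simp only [foldl_append_singleton_eq_map, List.nil_append]
  rw [show (PySem.Dict.keys (PySem.Dict.ofList trans_dict)).map
        (fun k => PySem.Dict.getD (PySem.Dict.ofList trans_dict) k [])
      = PySem.Dict.values (PySem.Dict.ofList trans_dict) from
    (PySem.Dict.values_eq_map_keys _ (PySem.Dict.nodup_keys_ofList trans_dict) []).symm]
  cases h : PySem.Dict.values (PySem.Dict.ofList trans_dict) with
  | nil => simp [pvZip]
  | cons r rest => simp [pvZip, map_sum_pvZipAux_eq_foldl]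

-- ===== VERDICT (by name: the statement is the Claim_ definition above) =====
theorem count_transform_spec : Claim_equal_count_transform := by
  intro trans_dict _
  exact count_transform_eq trans_dict
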